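-- pv_equiv track=rewrite | github.com/tonyhan18/python-problem-solving | PPs/[1W]브루트포스,문자열,배열/3085.py | check
-- ===== SOURCE A (Python) =====
-- def check(a):
--     n = len(a)
--     c =1
--     ans = 1
--     for i in range(n):
--         # 행검사
--         c=1
--         for j in range(1,n):
--             if(a[i][j]==a[i][j-1]): c+=1
--             else: c=1
--             if(ans<c): ans=c
--
--         c=1
--         for j in range(1,n):
--             if(a[j][i]==a[j-1][i]): c+=1
--             else: c=1
--             if(ans<c): ans=c
--     return ans
-- ===== SOURCE B (Python) =====
-- def check(a):
--     n = len(a)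
--     lines = [row[:n] for row in a] + [[row[i] for row in a] for i in range(n)]
--
--     def has_run(L):
--         return any(line[s:s+L] == [line[s]] * L
--                    for line in lines for s in range(len(line) - L + 1))
--
--     lo, hi, best = 2, n, 1
--     while lo <= hi:
--         mid = (lo + hi) // 2
--         if has_run(mid):
--             best = mid
--             lo = mid + 1
--         else:
--             hi = mid - 1
--     return best
-- ===== Notes on version B (the rewrite author's own statement) =====
-- stated objective: alternative
-- what changed: B replaces A's direct run-counting scans by a binary search on the answer L with a decision procedure that tests whether any row or column of the grid's n x n square part contains a constant window of length L.
-- outside the precondition, e.g. on check([[]]): A returns 1, B raises IndexError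
import Mathlib
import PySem

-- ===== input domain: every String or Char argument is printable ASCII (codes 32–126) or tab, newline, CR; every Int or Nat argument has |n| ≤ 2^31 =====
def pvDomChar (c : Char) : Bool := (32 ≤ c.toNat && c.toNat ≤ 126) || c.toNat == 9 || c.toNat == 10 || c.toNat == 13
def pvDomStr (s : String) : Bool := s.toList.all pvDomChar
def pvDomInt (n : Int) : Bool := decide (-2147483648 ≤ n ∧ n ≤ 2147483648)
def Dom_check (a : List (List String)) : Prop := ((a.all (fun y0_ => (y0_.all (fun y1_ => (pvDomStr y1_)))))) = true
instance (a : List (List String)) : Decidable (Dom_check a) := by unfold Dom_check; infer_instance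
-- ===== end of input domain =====

-- B answers by binary search on the run length L, deciding each probe by testing whether some
-- row/column of the grid's n x n square part contains a constant window of length L; alternative algorithm, not faster than A.


-- ===== PORT A =====
-- a[i][j]; in range on every access A makes, given Pre_check
def pyAt (a : List (List String)) (i j : Int) : String :=
  PySem.List.pyGetD (PySem.List.pyGetD a i []) j ""

-- the body of A's inner loops: update c, then update ans
def innerStep (x y : String) (st : Int × Int) : Int × Int :=
  let c := if x = y then st.1 + 1 else 1
  (c, if st.2 < c then c else st.2)

def check (a : List (List String)) : Int :=
  let n : Int := PySem.List.len a
  (PySem.List.pyRange 0 n 1).foldl (fun ans i =>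
    let r := (PySem.List.pyRange 1 n 1).foldl
        (fun (st : Int × Int) j => innerStep (pyAt a i j) (pyAt a i (j - 1)) st) (1, ans)
    let s := (PySem.List.pyRange 1 n 1).foldl
        (fun (st : Int × Int) j => innerStep (pyAt a j i) (pyAt a (j - 1) i) st) (1, r.2)
    s.2) 1

-- ===== PORT B =====
-- has_run(L): some line has a window line[s:s+L] equal to [line[s]] * L
def hasRunB (lines : List (List String)) (L : Int) : Bool :=
  lines.any (fun line =>
    (PySem.List.pyRange 0 ((line.length : Int) - L + 1) 1).any (fun s =>
      PySem.List.slice line (some s) (some (s + L))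
        == List.replicate L.toNat (PySem.List.pyGetD line s "")))

-- the while-loop of Source B; the Nat argument is pure fuel (a totality guard, always sufficient)
def bsB (lines : List (List String)) : Nat → Int → Int → Int → Int
  | 0, _, _, ans => ans
  | fuel + 1, lo, hi, ans =>
      if lo ≤ hi then
        let mid := PySem.Int.floordiv (lo + hi) 2
        if hasRunB lines mid then bsB lines fuel (mid + 1) hi mid
        else bsB lines fuel lo (mid - 1) ans
      else ans

def check_alt (a : List (List String)) : Int :=
  let n : Int := PySem.List.len a
  let lines := a.map (fun row => PySem.List.slice row none (some n))
    ++ (PySem.List.pyRange 0 n 1).map (fun i => a.map (fun row => PySem.List.pyGetD row i ""))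
  bsB lines (n.toNat + 1) 2 n 1

-- ===== PRECONDITION & SPEC =====
-- Pre_check excludes the inputs on which A raises IndexError (n = len(a) ≥ 2 with a row shorter
-- than n) and the single corner grid shape of one row shorter than 1 (an empty row), where A
-- returns 1 from empty inner loops while B's natural column indexing raises (cited in the claim).
def Pre_check (a : List (List String)) : Prop := ∀ row ∈ a, a.length ≤ row.length
instance (a : List (List String)) : Decidable (Pre_check a) := by unfold Pre_check; infer_instance
def pvWitness_check : List (List String) := [["x", "y"], ["y", "y"]]

def Spec_check (a : List (List String)) (out : Int) : Prop := out = check_alt a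
instance (a : List (List String)) (out : Int) : Decidable (Spec_check a out) := by unfold Spec_check; infer_instance

-- ===== CLAIM (what is proved, stated in full; the proofs are below) =====
def Claim_equal_check : Prop := ∀ (a : List (List String)), Dom_check a → Pre_check a → Spec_check a (check a)

-- ===== LEMMAS AND PROOFS =====

-- A's inner-loop body, threading (current run, best) over the elements, previous element explicit
def runA : String → List String → Int × Int → Int × Int
  | _, [], st => st
  | p, x :: xs, st =>
      let c := if x = p then st.1 + 1 else 1
      runA x xs (c, max st.2 c)

-- proof-side view of the longest run of a line (1 for the empty line)
def lr : List String → Int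
  | [] => 1
  | x :: xs => (runA x xs (1, 1)).2

theorem ite_lt_eq_max (a c : Int) : (if a < c then c else a) = max a c := by
  rw [max_def]; split_ifs <;> omega

-- the zip of a list with its own tail folds exactly like runA
theorem zip_foldl_runA (xs : List String) : ∀ (p : String) (st : Int × Int),
    (xs.zip (p :: xs)).foldl
      (fun (st : Int × Int) (q : String × String) =>
        let c := if q.1 = q.2 then st.1 + 1 else 1
        (c, max st.2 c)) st = runA p xs st := by
  induction xs with
  | nil => intro p st; rfl
  | cons y r ih =>
      intro p st
      simp only [List.zip_cons_cons, List.foldl_cons, runA]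
      exact ih y _

-- pulling a max out of runA's best component
theorem runA_max (xs : List String) : ∀ (p : String) (c a b : Int),
    (runA p xs (c, max a b)).2 = max a (runA p xs (c, b)).2 := by
  induction xs with
  | nil => intro p c a b; rfl
  | cons y r ih =>
      intro p c a b
      simp only [runA]
      rw [max_assoc, ih, ih]

-- index fold over range(1, len l) of a function of l[j], l[j-1] = fold over zip(tail,l)
theorem L1 (l : List String) (st : Int × Int)
    (f : Int × Int → String × String → Int × Int) :
    (PySem.List.pyRange 1 (l.length : Int) 1).foldl
        (fun st j => f st (PySem.List.pyGetD (l.tail.zip l) (j - 1) ("", ""))) st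
      = (l.tail.zip l).foldl f st := by
  cases l with
  | nil => rw [show ((List.length ([] : List String)) : Int) = 0 from rfl,
        PySem.List.pyRange_one_eq_nil (by omega)]; rfl
  | cons x xs =>
      set l := x :: xs with hl
      have hz : ((l.tail.zip l).length : Int) = (l.length : Int) - 1 := by
        rw [hl]; simp only [List.tail_cons, List.length_zip, List.length_cons]
        have : min xs.length (xs.length + 1) = xs.length := by omega
        rw [this]; push_cast; ring
      have h1 : PySem.List.pyRange 1 (l.length : Int) 1
          = (PySem.List.pyRange 0 ((l.tail.zip l).length : Int) 1).map (· + 1) := by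
        rw [PySem.List.pyRange_one, PySem.List.pyRange_one, List.map_map]
        have hN : ((l.length : Int) - 1).toNat = (((l.tail.zip l).length : Int) - 0).toNat := by
          omega
        rw [← hN]
        apply List.map_congr_left
        intro k _
        simp only [Function.comp_apply]
        omega
      rw [h1, List.foldl_map]
      have h2 : ∀ (st : Int × Int) (j : Int),
          f st (PySem.List.pyGetD (l.tail.zip l) (j + 1 - 1) ("", ""))
            = f st (PySem.List.pyGetD (l.tail.zip l) j ("", "")) := by
        intro st j; congr 2; omega
      rw [PySem.List.foldl_congr_mem _ _
        (fun st j => f st (PySem.List.pyGetD (l.tail.zip l) j ("", ""))) st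
        (by intro acc j _; exact h2 acc j)]
      exact PySem.List.foldl_pyRange_zero_pyGetD' _ _ _ _

-- the central lemma: A's inner loop over a line l equals max ans (lr l), for ans ≥ 1
theorem runEq (l : List String) (ans : Int) (h : 1 ≤ ans) :
    ((PySem.List.pyRange 1 (l.length : Int) 1).foldl
        (fun (st : Int × Int) j =>
          innerStep (PySem.List.pyGetD l j "") (PySem.List.pyGetD l (j - 1) "") st) (1, ans)).2
      = max ans (lr l) := by
  cases l with
  | nil =>
      rw [show ((List.length ([] : List String)) : Int) = 0 from rfl,
        PySem.List.pyRange_one_eq_nil (by omega)]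
      have : lr [] = 1 := rfl
      rw [List.foldl_nil, this]
      simp only []
      omega
  | cons x xs =>
      set l := x :: xs with hl
      rw [PySem.List.foldl_congr_mem _ _
        (fun (st : Int × Int) j =>
          (fun (st : Int × Int) (q : String × String) =>
            let c := if q.1 = q.2 then st.1 + 1 else 1
            (c, max st.2 c)) st (PySem.List.pyGetD (l.tail.zip l) (j - 1) ("", ""))) (1, ans) ?_]
      · rw [L1 l (1, ans) (fun (st : Int × Int) (q : String × String) =>
            let c := if q.1 = q.2 then st.1 + 1 else 1
            (c, max st.2 c))]
        simp only [hl, List.tail_cons]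
        rw [zip_foldl_runA xs x (1, ans)]
        have hmax : (runA x xs (1, ans)).2 = max ans (runA x xs (1, 1)).2 := by
          have hm := runA_max xs x 1 ans 1
          have h1 : max ans 1 = ans := by omega
          rw [h1] at hm
          exact hm
        rw [hmax]
        rfl
      · intro acc j hj
        rw [PySem.List.mem_pyRange_one] at hj
        have hlen : (l.tail.zip l).length = xs.length := by
          rw [hl]; simp only [List.tail_cons, List.length_zip, List.length_cons]; omega
        have hj1 : 0 ≤ j - 1 := by omega
        have hlx : (l.length : Int) = (xs.length : Int) + 1 := by rw [hl]; simp
        have hj2 : j - 1 < ((l.tail.zip l).length : Int) := by rw [hlen]; omega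
        have hq : PySem.List.pyGetD (l.tail.zip l) (j - 1) ("", "")
            = (PySem.List.pyGetD l j "", PySem.List.pyGetD l (j - 1) "") := by
          have h3 : 0 ≤ j := by omega
          have h4 : j < (l.length : Int) := hj.2
          rw [PySem.List.pyGetD_eq_getElem _ _ hj1 hj2, List.getElem_zip]
          congr 1
          · rw [PySem.List.pyGetD_eq_getElem _ _ h3 h4, List.getElem_tail]
            congr 1
            omega
          · rw [PySem.List.pyGetD_eq_getElem _ _ hj1 (by omega)]
        simp only [hq, innerStep, ite_lt_eq_max]

-- max-accumulation of longest runs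
def Gm (ans : Int) (line : List String) : Int := max ans (lr line)

def rowFn (a : List (List String)) (i : Int) : List String := PySem.List.pyGetD a i []

def colFn (a : List (List String)) (i : Int) : List String :=
  a.map (fun r => PySem.List.pyGetD r i "")

theorem Gm_right_comm (x : Int) (b c : List String) : Gm (Gm x b) c = Gm (Gm x c) b := by
  simp only [Gm]
  exact max_right_comm x (lr b) (lr c)

theorem one_le_Gm (x : Int) (l : List String) (h : 1 ≤ x) : 1 ≤ Gm x l :=
  le_trans h (le_max_left _ _)

theorem foldl_Gm_comm (rs : List (List String)) : ∀ (x : Int) (c : List String),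
    rs.foldl Gm (Gm x c) = Gm (rs.foldl Gm x) c := by
  induction rs with
  | nil => intro x c; rfl
  | cons r rest ih =>
      intro x c
      simp only [List.foldl_cons]
      rw [Gm_right_comm x c r, ih]

theorem zip_split (rows : List (List String)) : ∀ (cols : List (List String)) (ans : Int),
    rows.length = cols.length →
    (rows.zip cols).foldl (fun ans p => Gm (Gm ans p.1) p.2) ans
      = cols.foldl Gm (rows.foldl Gm ans) := by
  induction rows with
  | nil =>
      intro cols ans h
      cases cols with
      | nil => rfl
      | cons c cs => simp at h
  | cons r rs ih =>
      intro cols ans h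
      cases cols with
      | nil => simp at h
      | cons c cs =>
          simp only [List.zip_cons_cons, List.foldl_cons]
          rw [ih cs (Gm (Gm ans r) c) (by simpa using h), foldl_Gm_comm]

-- folds agree when the step functions agree on states satisfying a preserved invariant
theorem foldl_inv {α : Type} (P : Int → Prop) (l : List α) (f g : Int → α → Int) :
    ∀ (s : Int), P s → (∀ s x, x ∈ l → P s → f s x = g s x ∧ P (g s x)) →
    l.foldl f s = l.foldl g s := by
  induction l with
  | nil => intro s _ _; rfl
  | cons x xs ih =>
      intro s hs hstep
      simp only [List.foldl_cons]
      obtain ⟨heq, hP⟩ := hstep s x (by simp) hs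
      rw [heq]
      exact ih (g s x) hP (fun s y hy hPs => hstep s y (by simp [hy]) hPs)

theorem min?_getD_all_eq (a : List (List String)) (ha : a ≠ [])
    (hpre : ∀ row ∈ a, row.length = a.length) :
    (((a.map (·.length)).min?).getD 0) = a.length := by
  have hrep : a.map (·.length) = List.replicate a.length a.length := by
    rw [List.eq_replicate_iff]
    constructor
    · simp
    · intro b hb
      obtain ⟨row, hrow, hlen⟩ := List.mem_map.mp hb
      rw [← hlen]; exact hpre row hrow
  rw [hrep]
  have hrepmin : ∀ (k v : Nat), (List.replicate (k + 1) v).min? = some v := by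
    intro k v
    induction k with
    | zero => simp [List.min?_cons]
    | succ m ih => rw [List.replicate_succ, List.min?_cons]; simp [ih]
  cases hA : a.length with
  | zero => exact absurd (List.length_eq_zero_iff.mp hA) ha
  | succ k => rw [hrepmin k (k + 1)]; rfl

theorem colFn_at (a : List (List String)) (_hpre : ∀ row ∈ a, row.length = a.length)
    (i t : Int) (_hi0 : 0 ≤ i) (_hi1 : i < (a.length : Int))
    (h0 : 0 ≤ t) (h1 : t < (a.length : Int)) :
    PySem.List.pyGetD (colFn a i) t "" = pyAt a t i := by
  unfold colFn pyAt
  rw [PySem.List.pyGetD_eq_getElem _ "" h0 (by simpa using h1), List.getElem_map,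
    PySem.List.pyGetD_eq_getElem a [] h0 h1]

theorem rowFn_len (a : List (List String)) (hpre : ∀ row ∈ a, row.length = a.length)
    (i : Int) (hi0 : 0 ≤ i) (hi1 : i < (a.length : Int)) :
    ((rowFn a i).length : Int) = (a.length : Int) := by
  unfold rowFn
  rw [PySem.List.pyGetD_eq_getElem a [] hi0 hi1]
  exact_mod_cast congrArg Nat.cast (hpre _ (List.getElem_mem _))

-- proof-side view of a square grid's columns
def colsB (a : List (List String)) : List (List String) :=
  (List.range (((a.map (·.length)).min?).getD 0)).map
    (fun j => a.map (fun r => (r[j]?).getD ""))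

-- A on a SQUARE grid equals the row/column max-of-longest-runs fold
theorem square_case (a : List (List String)) (hpre : ∀ row ∈ a, row.length = a.length) :
    check a = (colsB a).foldl (fun ans col => max ans (lr col))
      (a.foldl (fun ans line => max ans (lr line)) 1) := by
  by_cases ha : a = []
  · subst ha; rfl
  · simp only [check, PySem.List.len_eq]
    rw [show (fun (ans : Int) (line : List String) => max ans (lr line)) = Gm from rfl]
    have hcolsB : colsB a
        = (List.range a.length).map (fun k => a.map (fun r => (r[k]?).getD "")) := by
      unfold colsB
      rw [min?_getD_all_eq a ha hpre]
    rw [hcolsB]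
    set cl := (List.range a.length).map (fun k => a.map (fun r => (r[k]?).getD "")) with hcl
    -- per-iteration: A's two inner loops compute Gm (Gm s row_i) col_i
    have key : ∀ (s i : Int), i ∈ PySem.List.pyRange 0 (a.length : Int) 1 → 1 ≤ s →
        ((PySem.List.pyRange 1 (a.length : Int) 1).foldl
            (fun (st : Int × Int) j => innerStep (pyAt a j i) (pyAt a (j - 1) i) st)
            (1, ((PySem.List.pyRange 1 (a.length : Int) 1).foldl
                (fun (st : Int × Int) j => innerStep (pyAt a i j) (pyAt a i (j - 1)) st)
                (1, s)).2)).2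
          = Gm (Gm s (rowFn a i)) (colFn a i) := by
      intro s i hi hs
      rw [PySem.List.mem_pyRange_one] at hi
      have hi0 : 0 ≤ i := hi.1
      have hi1 : i < (a.length : Int) := hi.2
      have hrl := rowFn_len a hpre i hi0 hi1
      have hrow := runEq (rowFn a i) s hs
      rw [hrl] at hrow
      have hrow' : ((PySem.List.pyRange 1 (a.length : Int) 1).foldl
          (fun (st : Int × Int) j => innerStep (pyAt a i j) (pyAt a i (j - 1)) st)
          (1, s)).2 = Gm s (rowFn a i) := hrow
      rw [hrow']
      have hcong : (PySem.List.pyRange 1 (a.length : Int) 1).foldl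
          (fun (st : Int × Int) j => innerStep (pyAt a j i) (pyAt a (j - 1) i) st)
          (1, Gm s (rowFn a i))
          = (PySem.List.pyRange 1 (a.length : Int) 1).foldl
          (fun (st : Int × Int) j =>
            innerStep (PySem.List.pyGetD (colFn a i) j "")
              (PySem.List.pyGetD (colFn a i) (j - 1) "") st)
          (1, Gm s (rowFn a i)) := by
        apply PySem.List.foldl_congr_mem
        intro acc j hj
        rw [PySem.List.mem_pyRange_one] at hj
        rw [colFn_at a hpre i j hi0 hi1 (by omega) hj.2,
          colFn_at a hpre i (j - 1) hi0 hi1 (by omega) (by omega)]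
      rw [hcong]
      have hcl2 : ((colFn a i).length : Int) = (a.length : Int) := by
        unfold colFn; simp
      have hcol := runEq (colFn a i) (Gm s (rowFn a i)) (one_le_Gm s _ hs)
      rw [hcl2] at hcol
      exact hcol
    rw [foldl_inv (fun s => 1 ≤ s) (PySem.List.pyRange 0 (a.length : Int) 1) _
      (fun ans i => Gm (Gm ans (rowFn a i)) (colFn a i)) 1 (by norm_num)
      (fun s i hi hs => ⟨key s i hi hs, one_le_Gm _ _ (one_le_Gm _ _ hs)⟩)]
    -- fold over indices = fold over the zipped (row, column) pairs
    have hzl : ((a.zip cl).length : Int) = (a.length : Int) := by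
      simp [hcl]
    have hpair : ∀ (acc : Int) (i : Int), i ∈ PySem.List.pyRange 0 (a.length : Int) 1 →
        Gm (Gm acc (rowFn a i)) (colFn a i)
          = (fun (ans : Int) (p : List String × List String) => Gm (Gm ans p.1) p.2) acc
              (PySem.List.pyGetD (a.zip cl) i ([], [])) := by
      intro acc i hi
      rw [PySem.List.mem_pyRange_one] at hi
      have hi0 : 0 ≤ i := hi.1
      have hi1 : i < (a.length : Int) := hi.2
      have hq : PySem.List.pyGetD (a.zip cl) i ([], []) = (rowFn a i, colFn a i) := by
        rw [PySem.List.pyGetD_eq_getElem _ ([], []) hi0 (by rw [hzl]; exact hi1),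
          List.getElem_zip]
        congr 1
        · rw [show rowFn a i = PySem.List.pyGetD a i [] from rfl,
            PySem.List.pyGetD_eq_getElem a [] hi0 hi1]
        · simp only [hcl, List.getElem_map, List.getElem_range]
          unfold colFn
          apply List.map_congr_left
          intro r hr
          have hrlen : r.length = a.length := hpre r hr
          have hb : i.toNat < r.length := by omega
          rw [List.getElem?_eq_getElem hb, Option.getD_some,
            PySem.List.pyGetD_eq_getElem r "" hi0 (by exact_mod_cast by omega)]
      rw [hq]
    rw [PySem.List.foldl_congr_mem _ _
      (fun (ans : Int) (i : Int) =>
        (fun (ans : Int) (p : List String × List String) => Gm (Gm ans p.1) p.2) ans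
          (PySem.List.pyGetD (a.zip cl) i ([], []))) 1 hpair]
    rw [show ((a.length : Int)) = ((a.zip cl).length : Int) from hzl.symm]
    rw [PySem.List.foldl_pyRange_zero_pyGetD' (a.zip cl) ([], [])
      (fun (ans : Int) (p : List String × List String) => Gm (Gm ans p.1) p.2) 1]
    exact zip_split a cl 1 (by simp [hcl])

-- A reads only the first n cells of each row: clipping rows to n does not change check
theorem grid_access (a : List (List String)) (hall : ∀ row ∈ a, a.length ≤ row.length) :
    check a = check (a.map (fun row => row.take a.length)) := by
  have hAt : ∀ (t j : Int), 0 ≤ t → t < (a.length : Int) → 0 ≤ j → j < (a.length : Int) →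
      pyAt (a.map (fun row => row.take a.length)) t j = pyAt a t j := by
    intro t j ht0 ht1 hj0 hj1
    unfold pyAt
    have htm : t < ((a.map (fun row => row.take a.length)).length : Int) := by
      simpa using ht1
    rw [PySem.List.pyGetD_eq_getElem _ [] ht0 htm, List.getElem_map,
      PySem.List.pyGetD_eq_getElem a [] ht0 ht1]
    have hlen : a.length ≤ a[t.toNat].length := hall _ (List.getElem_mem _)
    have hjt : j < ((a[t.toNat].take a.length).length : Int) := by
      simp [List.length_take]; omega
    rw [PySem.List.pyGetD_eq_getElem _ "" hj0 hjt, List.getElem_take,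
      PySem.List.pyGetD_eq_getElem _ "" hj0 (by exact_mod_cast by omega)]
  simp only [check, PySem.List.len_eq, List.length_map]
  apply PySem.List.foldl_congr_mem
  intro ans i hi
  rw [PySem.List.mem_pyRange_one] at hi
  have hrow : (PySem.List.pyRange 1 (a.length : Int) 1).foldl
      (fun (st : Int × Int) j => innerStep (pyAt a i j) (pyAt a i (j - 1)) st) (1, ans)
      = (PySem.List.pyRange 1 (a.length : Int) 1).foldl
        (fun (st : Int × Int) j =>
          innerStep (pyAt (a.map (fun row => row.take a.length)) i j)
            (pyAt (a.map (fun row => row.take a.length)) i (j - 1)) st) (1, ans) := by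
    apply PySem.List.foldl_congr_mem
    intro acc j hj
    rw [PySem.List.mem_pyRange_one] at hj
    rw [hAt i j hi.1 hi.2 (by omega) hj.2, hAt i (j - 1) hi.1 hi.2 (by omega) (by omega)]
  rw [← hrow]
  apply congrArg
  apply PySem.List.foldl_congr_mem
  intro acc j hj
  rw [PySem.List.mem_pyRange_one] at hj
  rw [hAt j i (by omega) hj.2 hi.1 hi.2, hAt (j - 1) i (by omega) (by omega) hi.1 hi.2]

-- ---------- run-length facts for the binary-search side ----------

-- the best component of runA never decreases
theorem runA_best_le (xs : List String) : ∀ (p : String) (c b : Int),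
    b ≤ (runA p xs (c, b)).2 := by
  induction xs with
  | nil => intro p c b; exact le_refl b
  | cons x r ih =>
      intro p c b
      simp only [runA]
      exact le_trans (le_max_left b _) (ih x _ _)

-- runA is monotone in its state
theorem runA_mono (xs : List String) : ∀ (p : String) (c b c' b' : Int),
    c ≤ c' → b ≤ b' →
    (runA p xs (c, b)).1 ≤ (runA p xs (c', b')).1 ∧
    (runA p xs (c, b)).2 ≤ (runA p xs (c', b')).2 := by
  induction xs with
  | nil => intro p c b c' b' hc hb; exact ⟨hc, hb⟩
  | cons x r ih =>
      intro p c b c' b' hc hb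
      simp only [runA]
      apply ih
      · split_ifs <;> omega
      · have : (if x = p then c + 1 else 1) ≤ (if x = p then c' + 1 else 1) := by
          split_ifs <;> omega
        exact max_le_max hb this

theorem lr_cons_le (x : String) (xs : List String) : lr xs ≤ lr (x :: xs) := by
  cases xs with
  | nil => exact le_refl 1
  | cons y ys =>
      show (runA y ys (1, 1)).2 ≤ (runA x (y :: ys) (1, 1)).2
      simp only [runA]
      exact (runA_mono ys y 1 1 _ _ (by split_ifs <;> omega) (by
        have : (1 : Int) ≤ max 1 (if y = x then 1 + 1 else 1) := le_max_left _ _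
        omega)).2

theorem lr_drop_le (k : Nat) : ∀ (l : List String), lr (l.drop k) ≤ lr l := by
  induction k with
  | zero => intro l; exact le_refl _
  | succ m ih =>
      intro l
      cases l with
      | nil => exact le_refl _
      | cons x xs =>
          rw [List.drop_succ_cons]
          exact le_trans (ih xs) (lr_cons_le x xs)

-- a constant block at the head forces a run of its length
theorem runA_replicate_le (j : Nat) : ∀ (v : String) (rest : List String) (c b : Int),
    c ≤ b → c + (j : Int) ≤ (runA v (List.replicate j v ++ rest) (c, b)).2 := by
  induction j with
  | zero =>
      intro v rest c b hcb
      simpa using le_trans hcb (runA_best_le rest v c b)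
  | succ m ih =>
      intro v rest c b hcb
      rw [List.replicate_succ, List.cons_append]
      have hstep : runA v (v :: (List.replicate m v ++ rest)) (c, b)
          = runA v (List.replicate m v ++ rest) (c + 1, max b (c + 1)) := by
        simp [runA]
      rw [hstep]
      have := ih v rest (c + 1) (max b (c + 1)) (le_max_right _ _)
      push_cast
      omega

theorem lr_of_infix_replicate (l : List String) (v : String) (k : Nat)
    (hk : 1 ≤ k) (hinf : List.replicate k v <:+: l) : (k : Int) ≤ lr l := by
  obtain ⟨u, t, hl⟩ := hinf
  have hdrop : l.drop u.length = List.replicate k v ++ t := by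
    rw [← hl, List.append_assoc, List.drop_left]
  have h1 : (k : Int) ≤ lr (l.drop u.length) := by
    rw [hdrop]
    obtain ⟨m, rfl⟩ : ∃ m, k = m + 1 := ⟨k - 1, by omega⟩
    rw [List.replicate_succ, List.cons_append]
    show (↑(m + 1) : Int) ≤ (runA v (List.replicate m v ++ t) (1, 1)).2
    have := runA_replicate_le m v t 1 1 (le_refl 1)
    push_cast
    omega
  exact le_trans h1 (lr_drop_le u.length l)

-- the run counter and best never exceed what has been consumed
theorem runA_le_len (xs : List String) : ∀ (p : String) (c b : Int), 0 ≤ c →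
    (runA p xs (c, b)).2 ≤ max b (c + (xs.length : Int)) := by
  induction xs with
  | nil =>
      intro p c b _
      exact le_trans (le_refl _) (le_max_left _ _)
  | cons x r ih =>
      intro p c b hc0
      simp only [runA]
      have h := ih x (if x = p then c + 1 else 1) (max b (if x = p then c + 1 else 1))
        (by split_ifs <;> omega)
      have hc : (if x = p then c + 1 else 1) ≤ c + 1 := by split_ifs <;> omega
      simp only [List.length_cons]
      refine le_trans h (max_le (max_le (le_max_left _ _) ?_) ?_)
      · exact le_trans (by push_cast; omega) (le_max_right _ _)
      · exact le_trans (by push_cast; omega) (le_max_right _ _)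

theorem lr_le_len (l : List String) : lr l ≤ max 1 (l.length : Int) := by
  cases l with
  | nil => simp [lr]
  | cons x xs =>
      have h := runA_le_len xs x 1 1 (by omega)
      show (runA x xs (1, 1)).2 ≤ _
      simp only [List.length_cons] at h ⊢
      refine le_trans h (max_le ?_ ?_)
      · exact le_trans (by omega) (le_max_right _ _)
      · exact le_trans (by push_cast; omega) (le_max_right _ _)

-- whenever a line is nonempty, its longest run is realised by a constant infix
theorem runA_witness (xs : List String) : ∀ (p : String) (c b : Int) (u : List String),
    1 ≤ c → List.replicate c.toNat p <:+ (u ++ [p]) →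
    (∃ (q : String) (k : Nat), (k : Int) = b ∧ 1 ≤ k ∧ List.replicate k q <:+: (u ++ [p])) →
    ∃ (q : String) (k : Nat), (k : Int) = (runA p xs (c, b)).2 ∧ 1 ≤ k ∧
      List.replicate k q <:+: (u ++ [p] ++ xs) := by
  induction xs with
  | nil =>
      intro p c b u _ _ hb
      obtain ⟨q, k, hk, hk1, hinf⟩ := hb
      exact ⟨q, k, hk, hk1, by simpa using hinf⟩
  | cons x r ih =>
      intro p c b u hc hsuf hb
      simp only [runA]
      have hc0 : 0 ≤ c := by omega
      -- suffix invariant for the new counter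
      have hsuf' : List.replicate (if x = p then c + 1 else 1).toNat x
          <:+ ((u ++ [p]) ++ [x]) := by
        by_cases hx : x = p
        · subst hx
          rw [if_pos rfl]
          have : (c + 1).toNat = c.toNat + 1 := by omega
          rw [this, List.replicate_succ']
          obtain ⟨w, hw⟩ := hsuf
          exact ⟨w, by rw [← List.append_assoc, hw]⟩
        · rw [if_neg hx]
          exact ⟨u ++ [p], rfl⟩
      -- witness for the new best
      have hb' : ∃ (q : String) (k : Nat), (k : Int) = max b (if x = p then c + 1 else 1) ∧ 1 ≤ k ∧
          List.replicate k q <:+: ((u ++ [p]) ++ [x]) := by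
        rcases max_cases b (if x = p then c + 1 else 1) with ⟨he, hge⟩ | ⟨he, hlt⟩
        · obtain ⟨q, k, hk, hk1, hinf⟩ := hb
          exact ⟨q, k, by rw [he]; exact hk, hk1,
            hinf.trans (List.prefix_append _ _).isInfix⟩
        · refine ⟨x, (if x = p then c + 1 else 1).toNat, ?_, ?_, hsuf'.isInfix⟩
          · rw [he]; split_ifs <;> omega
          · split_ifs <;> omega
      have := ih x (if x = p then c + 1 else 1) (max b (if x = p then c + 1 else 1))
        (u ++ [p]) (by split_ifs <;> omega) hsuf' hb'
      obtain ⟨q, k, hk, hk1, hinf⟩ := this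
      exact ⟨q, k, hk, hk1, by
        have : u ++ [p] ++ [x] ++ r = u ++ [p] ++ (x :: r) := by simp
        rwa [this] at hinf⟩

theorem lr_witness (l : List String) (hl : l ≠ []) :
    ∃ (q : String) (k : Nat), (k : Int) = lr l ∧ 1 ≤ k ∧ List.replicate k q <:+: l := by
  cases l with
  | nil => exact absurd rfl hl
  | cons x xs =>
      have := runA_witness xs x 1 1 [] (le_refl 1)
        (by simp) ⟨x, 1, rfl, le_refl 1, by simp⟩
      simpa using this

-- ---------- the decision procedure hasRunB ----------

theorem hasRun_iff (lines : List (List String)) (L : Int) (hL : 1 ≤ L) :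
    hasRunB lines L = true ↔
      ∃ line ∈ lines, ∃ (v : String), List.replicate L.toNat v <:+: line := by
  constructor
  · intro h
    rw [hasRunB, List.any_eq_true] at h
    obtain ⟨line, hline, h⟩ := h
    rw [List.any_eq_true] at h
    obtain ⟨s, hs, heq⟩ := h
    rw [beq_iff_eq] at heq
    rw [PySem.List.mem_pyRange_one] at hs
    have hs0 : 0 ≤ s := hs.1
    have hsl : 0 ≤ s + L := by omega
    rw [PySem.List.slice_toNat _ hs0 hsl] at heq
    refine ⟨line, hline, PySem.List.pyGetD line s "", ?_⟩
    rw [← heq]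
    have htk : (s + L).toNat - s.toNat = L.toNat := by omega
    rw [htk] at heq ⊢
    exact ((List.take_prefix _ _).isInfix).trans (List.drop_suffix _ _).isInfix
  · rintro ⟨line, hline, v, u, t, hl⟩
    rw [hasRunB, List.any_eq_true]
    refine ⟨line, hline, ?_⟩
    rw [List.any_eq_true]
    have hLt : (L.toNat : Int) = L := by omega
    have hlen : line.length = u.length + L.toNat + t.length := by
      rw [← hl]; simp; omega
    have hub : (u.length : Int) < (line.length : Int) := by rw [hlen]; push_cast; omega
    refine ⟨(u.length : Int), ?_, ?_⟩
    · rw [PySem.List.mem_pyRange_one]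
      constructor
      · omega
      · rw [hlen]; push_cast; omega
    · rw [beq_iff_eq]
      have hd : line.drop u.length = List.replicate L.toNat v ++ t := by
        rw [← hl, List.append_assoc, List.drop_left]
      have hget : PySem.List.pyGetD line (u.length : Int) "" = v := by
        rw [PySem.List.pyGetD_eq_getElem line "" (by omega) hub]
        subst hl
        simp only [Int.toNat_natCast, List.append_assoc]
        rw [List.getElem_append_right (Nat.le_refl u.length)]
        simp only [Nat.sub_self]
        rw [List.getElem_append_left (by simp; omega)]
        exact List.getElem_replicate _
      rw [hget, PySem.List.slice_toNat _ (by omega) (by omega)]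
      have h1 : ((u.length : Int)).toNat = u.length := by omega
      have h2 : ((u.length : Int) + L).toNat - ((u.length : Int)).toNat = L.toNat := by omega
      rw [h1] at h2
      rw [h1, h2, hd, List.take_append_of_le_length (by simp), List.take_replicate,
        min_self]

-- characterisation of the fold of Gm
theorem le_foldl_Gm (lines : List (List String)) : ∀ (init L : Int),
    L ≤ lines.foldl Gm init ↔ L ≤ init ∨ ∃ line ∈ lines, L ≤ lr line := by
  induction lines with
  | nil => intro init L; simp
  | cons l ls ih =>
      intro init L
      rw [List.foldl_cons, ih]
      constructor
      · rintro (h | h)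
        · rcases le_max_iff.mp h with h | h
          · exact Or.inl h
          · exact Or.inr ⟨l, by simp, h⟩
        · obtain ⟨line, hm, hle⟩ := h
          exact Or.inr ⟨line, by simp [hm], hle⟩
      · rintro (h | ⟨line, hm, hle⟩)
        · exact Or.inl (le_max_iff.mpr (Or.inl h))
        · rcases List.mem_cons.mp hm with rfl | hm
          · exact Or.inl (le_max_iff.mpr (Or.inr hle))
          · exact Or.inr ⟨line, hm, hle⟩

-- correctness of the binary search, under the boundary characterisation of hasRunB
theorem bs_eq (lines : List (List String)) (M : Int)
    (hchar : ∀ L : Int, 2 ≤ L → (hasRunB lines L = true ↔ L ≤ M)) :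
    ∀ (fuel : Nat) (lo hi ans : Int), (hi + 1 - lo).toNat < fuel →
      lo = ans + 1 → 1 ≤ ans → ans ≤ M → (M ≤ hi ∨ M ≤ ans) →
      bsB lines fuel lo hi ans = M := by
  intro fuel
  induction fuel with
  | zero => intro lo hi ans h; omega
  | succ f ih =>
      intro lo hi ans hfuel hlo hans hansM hM
      rw [bsB]
      by_cases hle : lo ≤ hi
      · rw [if_pos hle]
        obtain ⟨hm1, hm2⟩ := PySem.Int.floordiv_two_mid_bounds hle
        set mid := PySem.Int.floordiv (lo + hi) 2 with hmid
        have hmid2 : 2 ≤ mid := by omega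
        by_cases hrun : hasRunB lines mid = true
        · rw [if_pos hrun]
          have hmidM : mid ≤ M := (hchar mid hmid2).mp hrun
          exact ih (mid + 1) hi mid (by omega) rfl (by omega) hmidM
            (by rcases hM with h | h <;> omega)
        · rw [if_neg hrun]
          have hMlt : M < mid := by
            by_contra hc
            exact hrun ((hchar mid hmid2).mpr (by omega))
          exact ih lo (mid - 1) ans (by omega) hlo hans hansM (by omega)
      · rw [if_neg hle]
        omega

-- lengths of the lines of a clipped square grid
theorem lines_len_le (a : List (List String)) (line : List String)
    (hm : line ∈ (a.map (fun row => row.take a.length))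
        ++ colsB (a.map (fun row => row.take a.length))) :
    (line.length : Int) ≤ (a.length : Int) := by
  rcases List.mem_append.mp hm with h | h
  · obtain ⟨r, _, rfl⟩ := List.mem_map.mp h
    simp [List.length_take]
  · unfold colsB at h
    obtain ⟨j, _, rfl⟩ := List.mem_map.mp h
    simp

-- B's indexed column extraction equals the columns of the clipped square grid, under Pre_check
theorem colsEq (a : List (List String)) (hall : ∀ row ∈ a, a.length ≤ row.length) :
    (PySem.List.pyRange 0 (a.length : Int) 1).map
        (fun i => a.map (fun row => PySem.List.pyGetD row i ""))
      = colsB (a.map (fun row => row.take a.length)) := by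
  by_cases ha : a = []
  · subst ha; rfl
  · have hgp : ∀ row ∈ (a.map (fun row => row.take a.length)),
        row.length = (a.map (fun row => row.take a.length)).length := by
      intro row hrow
      rw [List.length_map]
      obtain ⟨r, hr, rfl⟩ := List.mem_map.mp hrow
      rw [List.length_take]
      exact Nat.min_eq_left (hall r hr)
    have hmapne : a.map (fun row => row.take a.length) ≠ [] := by simpa using ha
    unfold colsB
    rw [min?_getD_all_eq _ hmapne hgp, List.length_map]
    rw [PySem.List.pyRange_one]
    have hN : ((a.length : Int) - 0).toNat = a.length := by omega
    rw [hN, List.map_map]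
    apply List.map_congr_left
    intro j hj
    rw [List.mem_range] at hj
    simp only [Function.comp_apply, List.map_map]
    apply List.map_congr_left
    intro r hr
    have hrlen : a.length ≤ r.length := hall r hr
    have hb : j < (r.take a.length).length := by
      rw [List.length_take]; omega
    simp only [Function.comp_apply]
    rw [List.getElem?_eq_getElem hb, Option.getD_some, List.getElem_take,
      PySem.List.pyGetD_eq_getElem r "" (by omega) (by exact_mod_cast by omega)]
    simp

-- ===== VERDICT (by name: the statement is the Claim_ definition above) =====
theorem check_spec : Claim_equal_check := by
  intro a _hdom hall
  unfold Spec_check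
  set clip := a.map (fun row => row.take a.length) with hclip
  have hgridpre : ∀ row ∈ clip, row.length = clip.length := by
    intro row hrow
    rw [hclip, List.length_map]
    obtain ⟨r, hr, rfl⟩ := List.mem_map.mp hrow
    rw [List.length_take]
    exact Nat.min_eq_left (hall r hr)
  have hA : check a = (clip ++ colsB clip).foldl Gm 1 := by
    rw [grid_access a hall, square_case _ hgridpre, List.foldl_append]
    rfl
  have hB : check_alt a = bsB (clip ++ colsB clip) (a.length + 1) 2 (a.length : Int) 1 := by
    simp only [check_alt, PySem.List.len_eq, PySem.List.slice_to_natCast,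
      Int.toNat_natCast, hclip]
    rw [colsEq a hall]
  set lines := clip ++ colsB clip with hlines
  set M := lines.foldl Gm 1 with hM
  have h1M : 1 ≤ M := (le_foldl_Gm lines 1 1).mpr (Or.inl le_rfl)
  have hMor : M ≤ (a.length : Int) ∨ M ≤ 1 := by
    by_cases h1 : M ≤ 1
    · exact Or.inr h1
    · left
      rcases (le_foldl_Gm lines 1 M).mp le_rfl with h | ⟨line, hm, hle⟩
      · omega
      · have hlr := lr_le_len line
        have hll := lines_len_le a line hm
        have hn1 : 1 ≤ a.length := by
          by_contra hn
          have : line.length = 0 := by omega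
          have : lr line ≤ 1 := by
            have := lr_le_len line
            omega
          omega
        have hx : max 1 ((line.length : Int)) ≤ (a.length : Int) :=
          max_le (by omega) hll
        omega
  have hchar : ∀ L : Int, 2 ≤ L → (hasRunB lines L = true ↔ L ≤ M) := by
    intro L hL
    constructor
    · intro h
      obtain ⟨line, hm, v, hinf⟩ := (hasRun_iff lines L (by omega)).mp h
      have := lr_of_infix_replicate line v L.toNat (by omega) hinf
      exact (le_foldl_Gm lines 1 L).mpr (Or.inr ⟨line, hm, by omega⟩)
    · intro h
      rcases (le_foldl_Gm lines 1 L).mp h with h1 | ⟨line, hm, hle⟩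
      · omega
      · have hne : line ≠ [] := by
          intro hnil
          rw [hnil] at hle
          have : lr ([] : List String) = 1 := rfl
          omega
        obtain ⟨q, k, hk, hk1, hinf⟩ := lr_witness line hne
        have hkL : L.toNat ≤ k := by omega
        have hsplit : List.replicate k q
            = List.replicate L.toNat q ++ List.replicate (k - L.toNat) q := by
          rw [← List.replicate_add]
          congr 1
          omega
        refine (hasRun_iff lines L (by omega)).mpr ⟨line, hm, q, ?_⟩
        refine List.IsInfix.trans ?_ hinf
        rw [hsplit]
        exact (List.prefix_append _ _).isInfix
  rw [hA, hB]
  exact (bs_eq lines M hchar (a.length + 1) 2 (a.length : Int) 1 (by omega) rfl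
    le_rfl h1M (by omega)).symm
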